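-- pv_equiv track=rewrite | github.com/Tong-Wuu/Technical-Questions | rolling-string.py | solution_4_roll
-- ===== SOURCE A (Python) =====
-- def solution_4_roll(s, roll):
--     import collections
--     counter = collections.Counter(roll)
--     sumCounter = sum(counter.values())
--     ordChar = [ord(char) for char in s]
--
--     for i in range(len(ordChar)):
--         cur_roll = sumCounter - counter.get(i, 0)
--         ordChar[i] += cur_roll
--
--     return ''.join(chr(char) for char in ordChar)
-- ===== SOURCE B (Python) =====
-- def solution_4_roll(s, roll):
--     n = len(roll)
--     ordChar = [ord(c) + n for c in s]
--     for r in roll: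
--         if 0 <= r < len(ordChar):
--             ordChar[r] -= 1
--     return ''.join(map(chr, ordChar))
-- ===== Notes on version B (the rewrite author's own statement) =====
-- stated objective: alternative
-- what changed: B scatters: it adds len(roll) to every character code up front and then subtracts 1 per in-range roll entry, instead of A's Counter build plus a per-index gather of sum-minus-count.
import Mathlib
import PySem

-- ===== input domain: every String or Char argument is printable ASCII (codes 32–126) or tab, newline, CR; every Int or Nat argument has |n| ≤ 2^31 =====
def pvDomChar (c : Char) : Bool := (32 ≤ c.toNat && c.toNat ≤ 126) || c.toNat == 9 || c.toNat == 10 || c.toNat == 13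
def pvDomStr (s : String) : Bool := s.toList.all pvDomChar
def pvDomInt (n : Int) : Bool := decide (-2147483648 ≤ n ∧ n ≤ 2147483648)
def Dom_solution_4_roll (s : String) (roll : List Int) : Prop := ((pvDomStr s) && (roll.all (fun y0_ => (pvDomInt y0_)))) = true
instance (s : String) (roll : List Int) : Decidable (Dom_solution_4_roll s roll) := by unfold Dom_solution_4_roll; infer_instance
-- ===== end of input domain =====

-- B scatters per-roll decrements onto positions instead of A's Counter build plus per-index gather; same cost, different traversal.

-- ===== PORT A =====
-- chr is ported by hand via Char.ofNat: exact on Pre_ (every produced code is a valid non-surrogate codepoint)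
def solution_4_roll (s : String) (roll : List Int) : String :=
  let counter := PySem.Dict.counter roll
  let sumCounter := counter.values.foldl (· + ·) 0
  let ordChar := s.toList.map (fun c => (c.toNat : Int))
  let ordChar2 := (List.range ordChar.length).foldl
    (fun l i => l.modify i (fun v => v + (sumCounter - counter.getD (i : Int) 0))) ordChar
  String.ofList (ordChar2.map (fun v => Char.ofNat v.toNat))

-- ===== PORT B =====
def solution_4_roll_alt (s : String) (roll : List Int) : String :=
  let ordChar := s.toList.map (fun c => (c.toNat : Int) + roll.length)
  let ordChar2 := roll.foldl
    (fun l r => if 0 ≤ r ∧ r < (l.length : Int) then l.modify r.toNat (fun v => v - 1) else l) ordChar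
  String.ofList (ordChar2.map (fun v => Char.ofNat v.toNat))

-- ===== PRECONDITION & SPEC =====
-- Pre_ excludes inputs whose shifted codes leave the valid-Char range: beyond 0x10FFFF Python's chr raises
-- ValueError, and in the surrogate range 0xD800–0xDFFF Python A returns a string a Lean String cannot
-- represent (both need rolls longer than ~55000 entries; the Python programs agree wherever both return).
def Pre_solution_4_roll (s : String) (roll : List Int) : Prop :=
  ∀ p ∈ s.toList.zipIdx,
    ((p.1.toNat : Int) + roll.length - roll.count (p.2 : Int) < 55296 ∨
      57344 ≤ (p.1.toNat : Int) + roll.length - roll.count (p.2 : Int)) ∧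
    (p.1.toNat : Int) + roll.length - roll.count (p.2 : Int) ≤ 1114111
instance (s : String) (roll : List Int) : Decidable (Pre_solution_4_roll s roll) := by
  unfold Pre_solution_4_roll; infer_instance
def pvWitness_solution_4_roll : String × List Int := ("ab", [0, -1, 5])
def Spec_solution_4_roll (s : String) (roll : List Int) (out : String) : Prop := out = solution_4_roll_alt s roll
instance (s : String) (roll : List Int) (out : String) : Decidable (Spec_solution_4_roll s roll out) := by unfold Spec_solution_4_roll; infer_instance

-- ===== CLAIM (what is proved, stated in full; the proofs are below) =====
def Claim_equal_solution_4_roll : Prop := ∀ (s : String) (roll : List Int), Dom_solution_4_roll s roll → Pre_solution_4_roll s roll → Spec_solution_4_roll s roll (solution_4_roll s roll)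

-- ===== LEMMAS AND PROOFS =====

-- folding + over a list of Ints is its sum
lemma foldl_add_eq_sum (l : List Int) : ∀ (a : Int), l.foldl (· + ·) a = a + l.sum := by
  induction l with
  | nil => intro a; simp
  | cons x l ih => intro a; simp [List.foldl_cons, ih]; ring

-- the sum of Counter(xs).values() is len(xs)
lemma sum_counter_values (xs : List Int) :
    (PySem.Dict.counter xs).values.foldl (· + ·) 0 = (xs.length : Int) := by
  have hv : (PySem.Dict.counter xs).values
      = (PySem.Set.ofList xs).map (fun k => (xs.count k : Int)) := by
    simp [PySem.Dict.values, PySem.Dict.items_counter, List.map_map, Function.comp]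
  have hperm : (PySem.Set.ofList xs).Perm xs.dedup := by
    rw [List.perm_ext_iff_of_nodup (PySem.Set.nodup_ofList xs) xs.nodup_dedup]
    intro a; simp [PySem.Set.mem_ofList, List.mem_dedup]
  rw [hv, foldl_add_eq_sum, zero_add,
    (hperm.map (fun k => (xs.count k : Int))).sum_eq]
  have : (fun k => (xs.count k : Int)) = (fun n : Nat => (n : Int)) ∘ xs.count := rfl
  rw [this, ← List.map_map, ← Nat.cast_list_sum, List.sum_map_count_dedup_eq_length]

-- A's loop: index j of l gets a j added once per occurrence of j in idxs; length is kept
lemma foldA_length (a : Nat → Int) (idxs : List Nat) : ∀ (l : List Int),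
    (idxs.foldl (fun l i => l.modify i (fun v => v + a i)) l).length = l.length := by
  induction idxs with
  | nil => intro l; rfl
  | cons i idxs ih => intro l; rw [List.foldl_cons, ih]; simp

lemma foldA (a : Nat → Int) (idxs : List Nat) :
    ∀ (l : List Int) (j : Nat), j < l.length →
      (idxs.foldl (fun l i => l.modify i (fun v => v + a i)) l)[j]? =
        some (l[j]! + (idxs.count j : Int) * a j) := by
  induction idxs with
  | nil =>
    intro l j hj
    simp [List.getElem?_eq_getElem hj, List.getElem!_eq_getElem?_getD,
      List.getElem?_eq_getElem hj]
  | cons i idxs ih =>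
    intro l j hj
    rw [List.foldl_cons]
    have hlen : j < (l.modify i (fun v => v + a i)).length := by simpa using hj
    rw [ih _ j hlen]
    by_cases hij : i = j
    · subst hij
      simp [List.getElem!_eq_getElem?_getD, List.getElem?_eq_getElem hj,
        List.getElem?_eq_getElem hlen, List.getElem_modify, List.count_cons]
      push_cast; ring
    · simp [List.getElem!_eq_getElem?_getD, List.getElem?_eq_getElem hj,
        List.getElem?_eq_getElem hlen, List.getElem_modify, hij, List.count_cons]

-- B's loop keeps the length
lemma foldB_length (roll : List Int) : ∀ (l : List Int),
    (roll.foldl (fun l r => if 0 ≤ r ∧ r < (l.length : Int) then l.modify r.toNat (fun v => v - 1) else l) l).length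
      = l.length := by
  induction roll with
  | nil => intro l; rfl
  | cons r roll ih => intro l; rw [List.foldl_cons, ih]; split <;> simp

-- B's loop: index j loses 1 per occurrence of (j : Int) in roll
lemma foldB (roll : List Int) :
    ∀ (l : List Int) (j : Nat), j < l.length →
      (roll.foldl (fun l r => if 0 ≤ r ∧ r < (l.length : Int) then l.modify r.toNat (fun v => v - 1) else l) l)[j]? =
        some (l[j]! - roll.count (j : Int)) := by
  induction roll with
  | nil =>
    intro l j hj
    simp [List.getElem?_eq_getElem hj, List.getElem!_eq_getElem?_getD,
      List.getElem?_eq_getElem hj]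
  | cons r roll ih =>
    intro l j hj
    rw [List.foldl_cons]
    by_cases hr : r = (j : Int)
    · subst hr
      have hg : (0:Int) ≤ (j:Int) ∧ (j:Int) < (l.length : Int) :=
        ⟨Int.natCast_nonneg j, by exact_mod_cast hj⟩
      rw [if_pos hg]
      have hlen : j < (l.modify ((j:Int)).toNat (fun v => v - 1)).length := by simpa using hj
      rw [ih _ j hlen]
      simp [List.getElem!_eq_getElem?_getD, List.getElem?_eq_getElem hj,
        List.getElem?_eq_getElem hlen, List.getElem_modify, List.count_cons]
      push_cast; ring
    · split
      · rename_i hg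
        have hne : r.toNat ≠ j := by
          intro h
          exact hr (by rw [← Int.toNat_of_nonneg hg.1, h])
        have hlen : j < (l.modify r.toNat (fun v => v - 1)).length := by simpa using hj
        rw [ih _ j hlen]
        simp [List.getElem!_eq_getElem?_getD, List.getElem?_eq_getElem hj,
          List.getElem?_eq_getElem hlen, List.getElem_modify, hne, List.count_cons, hr]
      · rw [ih _ j hj]
        simp [List.count_cons, hr]

-- ===== VERDICT (by name: the statement is the Claim_ definition above) =====
theorem solution_4_roll_spec : Claim_equal_solution_4_roll := by
  intro s roll _ _
  unfold Spec_solution_4_roll solution_4_roll solution_4_roll_alt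
  apply congrArg String.ofList
  apply List.ext_getElem?
  intro j
  rw [List.getElem?_map, List.getElem?_map]
  by_cases hj : j < s.toList.length
  · have hjA : j < (s.toList.map (fun c => (c.toNat : Int))).length := by simpa using hj
    have hjB : j < (s.toList.map (fun c => (c.toNat : Int) + roll.length)).length := by simpa using hj
    rw [show (s.toList.map (fun c => (c.toNat : Int))).length = s.toList.length by simp]
    rw [foldA _ _ _ j hjA, foldB _ _ j hjB]
    have hc1 : (List.range s.toList.length).count j = 1 :=
      List.count_eq_one_of_mem (List.nodup_range) (List.mem_range.2 hj)
    have hA : (s.toList.map (fun c => (c.toNat : Int)))[j]! = ((s.toList[j]'hj).toNat : Int) := by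
      simp [List.getElem!_eq_getElem?_getD, List.getElem?_eq_getElem hjA,
        List.getElem?_eq_getElem hj]
    have hB : (s.toList.map (fun c => (c.toNat : Int) + roll.length))[j]!
        = ((s.toList[j]'hj).toNat : Int) + roll.length := by
      simp [List.getElem!_eq_getElem?_getD, List.getElem?_eq_getElem hjB,
        List.getElem?_eq_getElem hj]
    rw [hc1, hA, hB, sum_counter_values, PySem.Dict.getD_counter]
    simp only [Option.map_some]
    congr 2
    ring
  · have hA : ((List.range (s.toList.map (fun c => (c.toNat : Int))).length).foldl
        (fun l i => l.modify i (fun v => v + ((PySem.Dict.counter roll).values.foldl (· + ·) 0 - (PySem.Dict.counter roll).getD (i : Int) 0)))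
        (s.toList.map (fun c => (c.toNat : Int))))[j]? = none := by
      rw [List.getElem?_eq_none_iff]
      rw [foldA_length]
      simpa using Nat.le_of_not_lt hj
    have hB : ((roll.foldl
        (fun l r => if 0 ≤ r ∧ r < (l.length : Int) then l.modify r.toNat (fun v => v - 1) else l)
        (s.toList.map (fun c => (c.toNat : Int) + roll.length))))[j]? = none := by
      rw [List.getElem?_eq_none_iff]
      rw [foldB_length]
      simpa using Nat.le_of_not_lt hj
    rw [hA, hB]
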